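-- pv_equiv track=rewrite | github.com/Fredtoby/trajectoryprediction | data_processing/format_lyft.py | instance_matching
-- ===== SOURCE A (Python) =====
-- def instance_matching(instance_tokens_list):
--     '''
--     assigning each instance_token with a numerical value and obtained a dictionary
--     :param instance_tokens_list: list of all instance_tokens
--     :return: obtained dictionary
--     '''
--
--     k = 1
--     instance_matching_dict = {}
--     visited_tokens_set = set()
--     for item7 in instance_tokens_list:
--
--         if item7 not in visited_tokens_set:
--             instance_matching_dict[item7] = k
--             visited_tokens_set.add(item7)
--             k += 1
--         else:
--             continue
--
--     return instance_matching_dict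
-- ===== SOURCE B (Python) =====
-- def instance_matching(instance_tokens_list):
--     '''
--     assigning each instance_token with a numerical value and obtained a dictionary
--     :param instance_tokens_list: list of all instance_tokens
--     :return: obtained dictionary
--     '''
--     instance_matching_dict = {}
--     remaining = list(instance_tokens_list)
--     i = 1
--     while remaining:
--         head = remaining[0]
--         instance_matching_dict[head] = i
--         remaining = [x for x in remaining if x != head]
--         i += 1
--     return instance_matching_dict
-- ===== Notes on version B (the rewrite author's own statement) =====
-- stated objective: alternative
-- what changed: Replaces A's single pass with a visited-set by repeated selection: take the first remaining token, assign it the next index, strip all its occurrences from the remaining list, and repeat until the list is empty (no visited-set, no per-element membership test).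
import Mathlib
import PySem

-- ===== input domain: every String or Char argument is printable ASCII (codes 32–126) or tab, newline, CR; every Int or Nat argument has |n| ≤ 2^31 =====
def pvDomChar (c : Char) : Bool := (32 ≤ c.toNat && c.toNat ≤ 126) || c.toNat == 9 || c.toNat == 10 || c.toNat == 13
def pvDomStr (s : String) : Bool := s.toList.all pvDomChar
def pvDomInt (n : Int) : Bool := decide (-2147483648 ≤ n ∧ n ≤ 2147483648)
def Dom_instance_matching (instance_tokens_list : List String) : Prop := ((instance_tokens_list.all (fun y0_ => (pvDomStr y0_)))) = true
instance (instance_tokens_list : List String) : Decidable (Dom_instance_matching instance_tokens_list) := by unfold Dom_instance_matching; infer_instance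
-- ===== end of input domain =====

-- B replaces A's single-pass visited-set loop by repeated selection (take first remaining token,
-- assign next index, strip its occurrences, repeat); equivalence proved on all inputs.

-- ===== PORT A =====
-- A's loop over the tokens, carrying (k, dict, visited set) exactly as the Python does.
def instance_matching (instance_tokens_list : List String) : List (String × Int) :=
  let st :=
    instance_tokens_list.foldl
      (fun (st : Int × PySem.Dict String Int × PySem.Set String) item7 =>
        let k := st.1
        let d := st.2.1
        let v := st.2.2
        if ¬ (PySem.Set.contains v item7) then
          (k + 1, d.insert item7 k, PySem.Set.add v item7)
        else
          st)
      (1, PySem.Dict.empty, PySem.Set.empty)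
  st.2.1.items

-- ===== PORT B =====
-- B's while loop: (remaining, dict, i); each round inserts the first remaining token with the
-- current index and filters all its occurrences out of `remaining` (the list comprehension).
def pvAltLoop (remaining : List String) (d : PySem.Dict String Int) (i : Int) :
    PySem.Dict String Int :=
  match remaining with
  | [] => d
  | head :: rest =>
      pvAltLoop ((head :: rest).filter (fun x => x != head)) (d.insert head i) (i + 1)
termination_by remaining.length
decreasing_by
  simp only [List.filter_cons, bne_self_eq_false, Bool.false_eq_true, if_neg,
    not_false_eq_true, List.length_cons]
  exact Nat.lt_succ_of_le (List.length_filter_le _ _)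

def instance_matching_alt (instance_tokens_list : List String) : List (String × Int) :=
  (pvAltLoop instance_tokens_list PySem.Dict.empty 1).items

-- ===== PRECONDITION & SPEC =====
def Spec_instance_matching (instance_tokens_list : List String) (out : List (String × Int)) : Prop := out = instance_matching_alt instance_tokens_list
instance (instance_tokens_list : List String) (out : List (String × Int)) : Decidable (Spec_instance_matching instance_tokens_list out) := by unfold Spec_instance_matching; infer_instance

-- ===== CLAIM (what is proved, stated in full; the proofs are below) =====
def Claim_equal_instance_matching : Prop := ∀ (instance_tokens_list : List String), Dom_instance_matching instance_tokens_list → Spec_instance_matching instance_tokens_list (instance_matching instance_tokens_list)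

-- ===== LEMMAS AND PROOFS =====

-- the tokens of l that are new relative to the already-visited list v, first occurrences in order
def pvNewElems (l : List String) (v : List String) : List String :=
  match l with
  | [] => []
  | x :: xs => if v.contains x then pvNewElems xs v else x :: pvNewElems xs (v ++ [x])

lemma pvLoop_items (l : List String) : ∀ (d : PySem.Dict String Int) (k : Int),
    (l.foldl
      (fun (st : Int × PySem.Dict String Int × PySem.Set String) item7 =>
        if ¬ (PySem.Set.contains st.2.2 item7) then
          (st.1 + 1, st.2.1.insert item7 st.1, PySem.Set.add st.2.2 item7)
        else
          st)
      (k, d, d.keys)).2.1.items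
    = d.items ++ (PySem.List.enumerate (pvNewElems l d.keys) k).map (fun p => (p.2, p.1)) := by
  induction l with
  | nil => intro d k; simp [pvNewElems]
  | cons x xs ih =>
    intro d k
    by_cases h : x ∈ d.keys
    · have hc : PySem.Set.contains d.keys x = true := by
        simp [PySem.Set.contains, h]
      simp only [List.foldl_cons, hc, not_true_eq_false, if_neg, not_false_eq_true]
      have hne : pvNewElems (x :: xs) d.keys = pvNewElems xs d.keys := by
        simp [pvNewElems, h]
      rw [hne]
      exact ih d k
    · have hc : PySem.Set.contains d.keys x = false := by
        simp [PySem.Set.contains, h]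
      have hdc : d.contains x = false := by
        by_contra hd
        exact h ((PySem.Dict.contains_iff_mem_keys d x).1 (by simpa using hd))
      have hkeys : (d.insert x k).keys = d.keys ++ [x] :=
        PySem.Dict.keys_insert_of_not_contains d k hdc
      have hadd : PySem.Set.add d.keys x = d.keys ++ [x] := by
        simp [PySem.Set.add, h]
      have hne : pvNewElems (x :: xs) d.keys = x :: pvNewElems xs (d.keys ++ [x]) := by
        simp [pvNewElems, h]
      simp only [List.foldl_cons, hc, if_pos, not_false_eq_true, Bool.false_eq_true]
      simp only [hadd, ← hkeys]
      rw [ih (d.insert x k) (k + 1)]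
      rw [PySem.Dict.items_insert_of_not_contains d k hdc, hkeys, hne]
      simp [PySem.List.enumerate_cons]

-- filtering out an already-visited token does not change the new elements
lemma pvNewElems_filter (l : List String) : ∀ (v : List String) (x : String), x ∈ v →
    pvNewElems (l.filter (fun y => y != x)) v = pvNewElems l v := by
  induction l with
  | nil => intro v x _; rfl
  | cons y ys ih =>
    intro v x hx
    by_cases hyx : y = x
    · subst hyx
      simp only [List.filter_cons, bne_self_eq_false, Bool.false_eq_true, if_neg,
        not_false_eq_true]
      rw [ih v y hx]
      simp [pvNewElems, List.contains_eq_mem, hx]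
    · have hb : (y != x) = true := by simpa using hyx
      simp only [List.filter_cons, hb, if_pos]
      by_cases hyv : y ∈ v
      · simp only [pvNewElems, List.contains_eq_mem, hyv, decide_true, ite_true]
        exact ih v x hx
      · simp only [pvNewElems, List.contains_eq_mem, hyv, decide_false,
          Bool.false_eq_true, if_neg, not_false_eq_true]
        exact congrArg (y :: ·) (ih (v ++ [y]) x (List.mem_append_left _ hx))

-- invariant of B's selection loop: no remaining token is a key yet
lemma pvAltLoop_items (n : Nat) : ∀ (remaining : List String), remaining.length ≤ n →
    ∀ (d : PySem.Dict String Int) (i : Int), (∀ y ∈ remaining, y ∉ d.keys) →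
    (pvAltLoop remaining d i).items
      = d.items ++ (PySem.List.enumerate (pvNewElems remaining d.keys) i).map (fun p => (p.2, p.1)) := by
  induction n with
  | zero =>
    intro remaining hlen d i _
    have : remaining = [] := List.eq_nil_of_length_eq_zero (Nat.le_zero.mp hlen)
    subst this; simp [pvAltLoop, pvNewElems]
  | succ n ih =>
    intro remaining hlen d i hinv
    match remaining with
    | [] => simp [pvAltLoop, pvNewElems]
    | head :: rest =>
      have hhk : head ∉ d.keys := hinv head (List.mem_cons_self)
      have hdc : d.contains head = false := by
        by_contra hd
        exact hhk ((PySem.Dict.contains_iff_mem_keys d head).1 (by simpa using hd))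
      have hkeys : (d.insert head i).keys = d.keys ++ [head] :=
        PySem.Dict.keys_insert_of_not_contains d i hdc
      have hfl : (head :: rest).filter (fun x => x != head) = rest.filter (fun x => x != head) := by
        simp
      have hlen' : (rest.filter (fun x => x != head)).length ≤ n :=
        Nat.le_trans (List.length_filter_le _ _) (Nat.le_of_succ_le_succ hlen)
      have hinv' : ∀ y ∈ rest.filter (fun x => x != head), y ∉ (d.insert head i).keys := by
        intro y hy
        have hym := List.mem_of_mem_filter hy
        have hyh : y ≠ head := by simpa using List.of_mem_filter hy
        rw [hkeys]
        simp only [List.mem_append, List.mem_singleton]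
        rintro (h1 | h2)
        · exact hinv y (List.mem_cons_of_mem _ hym) h1
        · exact hyh h2
      rw [pvAltLoop, hfl, ih _ hlen' (d.insert head i) (i + 1) hinv']
      rw [PySem.Dict.items_insert_of_not_contains d i hdc, hkeys]
      -- rewrite the new-elements list of the filtered remainder back to the original
      have h1 : pvNewElems (rest.filter (fun x => x != head)) (d.keys ++ [head])
          = pvNewElems rest (d.keys ++ [head]) :=
        pvNewElems_filter rest (d.keys ++ [head]) head (List.mem_append_right _ (List.mem_singleton.mpr rfl))
      have h2 : pvNewElems (head :: rest) d.keys = head :: pvNewElems rest (d.keys ++ [head]) := by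
        simp [pvNewElems, hhk]
      rw [h1, h2]
      simp [PySem.List.enumerate_cons]

-- ===== VERDICT (by name: the statement is the Claim_ definition above) =====
theorem instance_matching_spec : Claim_equal_instance_matching := by
  intro l _
  unfold Spec_instance_matching instance_matching instance_matching_alt
  have hA := pvLoop_items l PySem.Dict.empty 1
  simp only [PySem.Dict.keys_empty] at hA
  have hB := pvAltLoop_items l.length l (Nat.le_refl _) PySem.Dict.empty 1
    (by simp [PySem.Dict.keys_empty])
  simp only [PySem.Dict.keys_empty] at hB
  simp only [show (PySem.Set.empty : PySem.Set String) = ([] : List String) from rfl]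
  rw [hB]
  simpa using hA
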